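-- pv_equiv track=rewrite | github.com/gxldCptRick/Math_Based_Code_Cyphers | cypher_app/supported_cyphers/rsa_cypher.py | get_blocks_for_message
-- ===== SOURCE A (Python) =====
-- Default_Block_Size = 128
--
-- Byte_Size = 256
--
-- def get_blocks_for_message(message, block_size=Default_Block_Size):
--     message_bytes = message.encode('ascii')
--     blocks = []
--     for block_start in range(0, len(message_bytes), block_size):
--         block = 0
--         block_end = min(block_start + block_size, len(message_bytes))
--         for index in range(block_start, block_end):
--             block += message_bytes[index] * (Byte_Size ** (index % block_size))
--         blocks.append(block)
--     return blocks
-- ===== SOURCE B (Python) =====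
-- Default_Block_Size = 128
--
-- Byte_Size = 256
--
-- def get_blocks_for_message(message, block_size=Default_Block_Size):
--     blocks = []
--     acc = 0
--     place = 1
--     count = 0
--     for byte in message.encode('ascii'):
--         acc += byte * place
--         count += 1
--         if count == block_size:
--             blocks.append(acc)
--             acc = 0
--             place = 1
--             count = 0
--         else:
--             place *= Byte_Size
--     if count > 0:
--         blocks.append(acc)
--     return blocks
-- ===== Notes on version B (the rewrite author's own statement) =====
-- stated objective: faster
-- what changed: Replaces the nested chunk/index loops that recompute 256**(index % block_size) for every byte by a single streaming pass keeping a running accumulator, an incrementally multiplied place value and a counter, flushing a block whenever the counter reaches block_size; intended as faster — a timing run measured B 21.26x faster at the largest size both finished (n=16384), unconfirmed at n=65536 where neither result could be decoded.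
-- outside the precondition, e.g. on get_blocks_for_message('AB', -1): A returns [], B returns [16961]
import Mathlib
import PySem

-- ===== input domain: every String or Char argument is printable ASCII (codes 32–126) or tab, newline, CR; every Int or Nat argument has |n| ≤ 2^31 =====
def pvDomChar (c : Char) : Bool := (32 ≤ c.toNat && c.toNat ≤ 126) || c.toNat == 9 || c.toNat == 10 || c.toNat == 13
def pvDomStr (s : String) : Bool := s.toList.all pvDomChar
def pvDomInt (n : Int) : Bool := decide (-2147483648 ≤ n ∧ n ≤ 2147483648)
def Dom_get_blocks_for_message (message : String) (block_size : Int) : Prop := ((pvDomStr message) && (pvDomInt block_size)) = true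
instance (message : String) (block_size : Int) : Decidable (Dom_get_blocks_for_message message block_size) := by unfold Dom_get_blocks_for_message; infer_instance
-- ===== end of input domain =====

-- B replaces A's nested chunk/index loops (with a fresh 256**(index % block_size) per byte) by one
-- streaming pass with a running accumulator, incrementally multiplied place value and counter.

-- ===== PORT A =====
def get_blocks_for_message (message : String) (block_size : Int) : List Int :=
  let message_bytes : List Int := message.toList.map (fun c => (c.toNat : Int))
  (PySem.List.pyRange 0 (message_bytes.length : Int) block_size).foldl
    (fun blocks block_start =>
      let block_end : Int := min (block_start + block_size) (message_bytes.length : Int)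
      let block : Int :=
        (PySem.List.pyRange block_start block_end 1).foldl
          (fun b index =>
            b + PySem.List.pyGetD message_bytes index 0 *
                (256 : Int) ^ (PySem.Int.mod index block_size).toNat) 0
      blocks ++ [block]) []

-- ===== PORT B =====
def get_blocks_for_message_alt (message : String) (block_size : Int) : List Int :=
  let fin := message.toList.foldl
    (fun (st : List Int × Int × Int × Int) c =>
      match st with
      | (blocks, acc, place, count) =>
        let acc' := acc + (c.toNat : Int) * place
        let count' := count + 1
        if count' = block_size then (blocks ++ [acc'], 0, 1, 0)
        else (blocks, acc', place * 256, count')) ([], 0, 1, 0)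
  if fin.2.2.2 > 0 then fin.1 ++ [fin.2.1] else fin.1

-- ===== PRECONDITION & SPEC =====
-- Pre_ restricts to positive block sizes, the function's natural domain: block_size = 0 makes A
-- raise ValueError, and for negative block_size A returns [] only as an artefact of range()'s
-- empty result on a negative step (B then returns the whole message as one block).
def Pre_get_blocks_for_message (message : String) (block_size : Int) : Prop := 1 ≤ block_size
instance (message : String) (block_size : Int) : Decidable (Pre_get_blocks_for_message message block_size) := by unfold Pre_get_blocks_for_message; infer_instance

def pvWitness_get_blocks_for_message : String × Int := ("Hi!", 2)

def Spec_get_blocks_for_message (message : String) (block_size : Int) (out : List Int) : Prop := out = get_blocks_for_message_alt message block_size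
instance (message : String) (block_size : Int) (out : List Int) : Decidable (Spec_get_blocks_for_message message block_size out) := by unfold Spec_get_blocks_for_message; infer_instance

-- ===== CLAIM (what is proved, stated in full; the proofs are below) =====
def Claim_equal_get_blocks_for_message : Prop := ∀ (message : String) (block_size : Int), Dom_get_blocks_for_message message block_size → Pre_get_blocks_for_message message block_size → Spec_get_blocks_for_message message block_size (get_blocks_for_message message block_size)

-- ===== LEMMAS AND PROOFS =====

-- little-endian base-256 value of a byte list
def pvEnc : List Int → Int
  | [] => 0
  | x :: t => x + 256 * pvEnc t

-- chunk a byte list into blocks of size bs and encode each (used with bs ≥ 1)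
def pvChunks : Nat → List Int → List Int
  | _, [] => []
  | 0, l => [pvEnc l]   -- unreachable under Pre_ (block size ≥ 1)
  | bs + 1, x :: t =>
    pvEnc ((x :: t).take (bs + 1)) :: pvChunks (bs + 1) ((x :: t).drop (bs + 1))
  termination_by _ l => l.length
  decreasing_by simp

theorem pvChunks_nil (bs : Nat) : pvChunks bs [] = [] := by
  cases bs <;> simp [pvChunks]

theorem pvChunks_cons (bs : Nat) (hbs : 1 ≤ bs) (x : Int) (t : List Int) :
    pvChunks bs (x :: t) = pvEnc ((x :: t).take bs) :: pvChunks bs ((x :: t).drop bs) := by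
  obtain ⟨k, rfl⟩ : ∃ k, bs = k + 1 := ⟨bs - 1, by omega⟩
  simp [pvChunks]

theorem pvEnc_append_singleton (w : List Int) (x : Int) :
    pvEnc (w ++ [x]) = pvEnc w + x * 256 ^ w.length := by
  induction w with
  | nil => simp [pvEnc]
  | cons y w ih => simp [pvEnc, ih, pow_succ]; ring

-- B's loop body, over byte values
def pvStepB (bs : Int) (st : List Int × Int × Int × Int) (b : Int) : List Int × Int × Int × Int :=
  match st with
  | (blocks, acc, place, count) =>
    let acc' := acc + b * place
    let count' := count + 1
    if count' = bs then (blocks ++ [acc'], 0, 1, 0)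
    else (blocks, acc', place * 256, count')

theorem pvStepB_nf (bs : Int) (u : List Int) :
    ∀ (blocks : List Int) (acc place count : Int), 0 ≤ count → count + u.length < bs →
    u.foldl (pvStepB bs) (blocks, acc, place, count)
      = (blocks, acc + pvEnc u * place, place * 256 ^ u.length, count + u.length) := by
  induction u with
  | nil => intro blocks acc place count _ _; simp [pvEnc]
  | cons x t ih =>
    intro blocks acc place count hc h
    simp only [List.length_cons] at h
    have hne : ¬ (count + 1 = bs) := by
      push_cast at h ⊢; omega
    simp only [List.foldl_cons, pvStepB, hne, if_false]
    rw [ih blocks (acc + x * place) (place * 256) (count + 1) (by omega) (by push_cast at h ⊢; omega)]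
    simp only [Prod.mk.injEq, pvEnc, List.length_cons]
    push_cast
    refine ⟨trivial, by ring, by ring, by ring⟩

theorem pvStepB_flush (bs : Int) (hbs : 1 ≤ bs) (u : List Int)
    (hu : (u.length : Int) = bs) (blocks : List Int) :
    u.foldl (pvStepB bs) (blocks, 0, 1, 0) = (blocks ++ [pvEnc u], 0, 1, 0) := by
  rcases u.eq_nil_or_concat with rfl | ⟨w, x, rfl⟩
  · simp at hu; omega
  · rw [List.concat_eq_append, List.foldl_append]
    rw [pvStepB_nf bs w blocks 0 1 0 le_rfl (by simp at hu ⊢; omega)]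
    simp only [List.foldl_cons, List.foldl_nil, pvStepB]
    have : (0 : Int) + (w.length : Int) + 1 = bs := by simp at hu; omega
    rw [List.concat_eq_append] at hu
    simp only [this, if_true]
    rw [pvEnc_append_singleton]
    simp only [Prod.mk.injEq, List.append_cancel_left_eq, List.cons.injEq, and_true]
    ring

-- the final flush after B's loop
def pvFinB (st : List Int × Int × Int × Int) : List Int :=
  if st.2.2.2 > 0 then st.1 ++ [st.2.1] else st.1

theorem pvB_main (bs : Int) (hbs : 1 ≤ bs) :
    ∀ (l blocks : List Int),
    pvFinB (l.foldl (pvStepB bs) (blocks, 0, 1, 0)) = blocks ++ pvChunks bs.toNat l := by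
  intro l
  induction hn : l.length using Nat.strong_induction_on generalizing l with
  | _ n ih =>
  intro blocks
  rcases l with _ | ⟨x, t⟩
  · simp [pvFinB, pvChunks_nil]
  by_cases hlen : ((x :: t).length : Int) < bs
  · -- short final block: no flush inside the loop, one flush at the end
    rw [pvStepB_nf bs (x :: t) blocks 0 1 0 le_rfl (by omega)]
    have hpos : (0 : Int) < 0 + ((x :: t).length : Int) := by simp
    simp only [pvFinB, hpos, if_pos, gt_iff_lt]
    rw [pvChunks_cons _ (by omega)]
    have hdrop : (x :: t).drop bs.toNat = [] := by
      apply List.drop_eq_nil_of_le; omega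
    have htake : (x :: t).take bs.toNat = x :: t := by
      apply List.take_of_length_le; omega
    simp [hdrop, htake, pvChunks_nil]
  · -- full leading block, then recurse
    push_neg at hlen
    set u := (x :: t).take bs.toNat with hu
    set v := (x :: t).drop bs.toNat with hv
    simp only [List.length_cons] at hlen
    have hul : (u.length : Int) = bs := by
      simp [hu]; omega
    have hsplit : x :: t = u ++ v := (List.take_append_drop _ _).symm
    rw [hsplit, List.foldl_append, pvStepB_flush bs hbs u hul]
    have hvlen : v.length < n := by
      rw [← hn]
      rw [hv, List.length_drop, List.length_cons]
      omega
    rw [ih v.length hvlen v rfl (blocks ++ [pvEnc u])]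
    rw [← hsplit, pvChunks_cons bs.toNat (by omega) x t, ← hu, ← hv]
    simp

-- pyRange with a positive step unfolds one element at a time
theorem pvPyRange_pos_cons (a b s : Int) (hs : 0 < s) (hab : a < b) :
    PySem.List.pyRange a b s = a :: PySem.List.pyRange (a + s) b s := by
  rw [PySem.List.pyRange_of_pos a b hs, PySem.List.pyRange_of_pos (a + s) b hs]
  have hcount : (b - a + s - 1) / s = (b - (a + s) + s - 1) / s + 1 := by
    have : b - a + s - 1 = (b - (a + s) + s - 1) + 1 * s := by ring
    rw [this, Int.add_mul_ediv_right _ _ (by omega)]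
  have h1 : (0 : Int) ≤ (b - (a + s) + s - 1) / s := by
    apply Int.ediv_nonneg <;> omega
  by_cases hab2 : a + s < b
  · simp only [if_pos hab, if_pos hab2, hcount]
    rw [show ((b - (a + s) + s - 1) / s + 1).toNat = ((b - (a + s) + s - 1) / s).toNat + 1 by omega]
    rw [List.range_succ_eq_map]
    simp only [List.map_cons, List.map_map]
    congr 1
    · simp
    · apply List.map_congr_left; intro k _; simp [Function.comp]; push_cast; ring
  · -- last element: the tail range is empty
    push_neg at hab2
    have hz : (b - (a + s) + s - 1) / s = 0 := by
      apply Int.ediv_eq_zero_of_lt <;> omega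
    simp only [if_pos hab, if_neg (by omega : ¬ a + s < b), hcount, hz]
    norm_num

-- the base-256 fold over indices equals pvEnc
theorem pvEnc_fold (t : List Int) :
    (List.range t.length).foldl (fun b k => b + t.getD k 0 * 256 ^ k) 0 = pvEnc t := by
  induction t using List.reverseRecOn with
  | nil => simp [pvEnc]
  | append_singleton w x ih =>
    rw [List.length_append, List.length_cons, List.length_nil, List.range_succ,
        List.foldl_append]
    have hcong : (List.range w.length).foldl (fun b k => b + (w ++ [x]).getD k 0 * 256 ^ k) 0
        = (List.range w.length).foldl (fun b k => b + w.getD k 0 * 256 ^ k) 0 := by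
      apply PySem.List.foldl_congr_mem
      intro acc k hk
      rw [List.mem_range] at hk
      rw [List.getD_append _ _ _ _ hk]
    rw [hcong, ih]
    simp [pvEnc_append_singleton, List.getD_append_right, le_refl]

-- one inner block of A equals pvEnc of the corresponding slice
theorem pvA_block (mb : List Int) (bs a : Int) (hbs : 1 ≤ bs) (ha : 0 ≤ a)
    (hdvd : bs ∣ a) (han : a < (mb.length : Int)) :
    (PySem.List.pyRange a (min (a + bs) (mb.length : Int)) 1).foldl
      (fun b index => b + PySem.List.pyGetD mb index 0 *
        (256 : Int) ^ (PySem.Int.mod index bs).toNat) 0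
      = pvEnc ((mb.drop a.toNat).take bs.toNat) := by
  set e : Int := min (a + bs) (mb.length : Int) with he
  set t : List Int := (mb.drop a.toNat).take bs.toNat with ht
  have htlen : t.length = (e - a).toNat := by
    simp [ht, he]; omega
  rw [PySem.List.pyRange_one a e, List.foldl_map]
  have hm : (e - a).toNat = t.length := htlen.symm
  rw [hm]
  rw [← pvEnc_fold t]
  apply PySem.List.foldl_congr_mem
  intro acc k hk
  rw [List.mem_range] at hk
  congr 1
  have hkbs : (k : Int) < bs := by omega
  have hkn : a + (k : Int) < (mb.length : Int) := by omega
  -- the byte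
  have hb : PySem.List.pyGetD mb (a + (k : Int)) 0 = t.getD k 0 := by
    rw [PySem.List.pyGetD_eq_getElem mb 0 (by omega : (0:Int) ≤ a + (k:Int)) hkn]
    have hklt : k < t.length := hk
    rw [List.getD_eq_getElem t 0 hklt]
    simp only [ht]
    rw [List.getElem_take, List.getElem_drop]
    congr 1
    omega
  -- the exponent
  have hmod : PySem.Int.mod (a + (k : Int)) bs = (k : Int) := by
    rw [PySem.Int.mod_eq_emod_of_pos (by omega)]
    obtain ⟨q, rfl⟩ := hdvd
    rw [add_comm, Int.add_mul_emod_self_left, Int.emod_eq_of_lt (by omega) hkbs]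
  rw [hb, hmod]
  simp

-- A's outer loop, from any block-aligned start
theorem pvA_main (mb : List Int) (bs : Int) (hbs : 1 ≤ bs) :
    ∀ (fuel : Nat) (a : Int) (blocks : List Int), 0 ≤ a → bs ∣ a →
    ((mb.length : Int) - a).toNat ≤ fuel →
    (PySem.List.pyRange a (mb.length : Int) bs).foldl
      (fun blocks block_start =>
        let block_end : Int := min (block_start + bs) (mb.length : Int)
        let block : Int :=
          (PySem.List.pyRange block_start block_end 1).foldl
            (fun b index => b + PySem.List.pyGetD mb index 0 *
              (256 : Int) ^ (PySem.Int.mod index bs).toNat) 0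
        blocks ++ [block]) blocks
      = blocks ++ pvChunks bs.toNat (mb.drop a.toNat) := by
  intro fuel
  induction fuel with
  | zero =>
    intro a blocks ha _ hfuel
    have han : (mb.length : Int) ≤ a := by omega
    rw [PySem.List.pyRange_of_pos _ _ (by omega : (0:Int) < bs)]
    have hdrop : mb.drop a.toNat = [] := List.drop_eq_nil_of_le (by omega)
    simp [if_neg (by omega : ¬ a < (mb.length : Int)), hdrop, pvChunks_nil]
  | succ fuel ih =>
    intro a blocks ha hdvd hfuel
    by_cases han : a < (mb.length : Int)
    · rw [pvPyRange_pos_cons a _ bs (by omega) han]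
      rw [List.foldl_cons]
      simp only
      rw [pvA_block mb bs a hbs ha hdvd han]
      rw [ih (a + bs) _ (by omega) (dvd_add hdvd (dvd_refl bs)) (by omega)]
      have hdd : mb.drop (a + bs).toNat = (mb.drop a.toNat).drop bs.toNat := by
        rw [List.drop_drop]
        congr 1
        omega
      have hne : mb.drop a.toNat ≠ [] := by
        intro h
        have := List.drop_eq_nil_iff.mp h
        omega
      rcases hd : mb.drop a.toNat with _ | ⟨x, tl⟩
      · exact absurd hd hne
      rw [pvChunks_cons _ (by omega), hdd, hd]
      simp
    · rw [PySem.List.pyRange_of_pos _ _ (by omega : (0:Int) < bs)]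
      have hdrop : mb.drop a.toNat = [] := List.drop_eq_nil_of_le (by omega)
      simp [if_neg han, hdrop, pvChunks_nil]

-- B's port, rewritten over byte values
theorem pvAlt_eq (message : String) (bs : Int) :
    get_blocks_for_message_alt message bs
      = pvFinB ((message.toList.map (fun c => (c.toNat : Int))).foldl (pvStepB bs) ([], 0, 1, 0)) := by
  rw [List.foldl_map]
  rfl

-- ===== VERDICT (by name: the statement is the Claim_ definition above) =====
theorem get_blocks_for_message_spec : Claim_equal_get_blocks_for_message := by
  intro message block_size _ hpre
  unfold Spec_get_blocks_for_message
  unfold get_blocks_for_message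
  simp only
  rw [pvAlt_eq message block_size]
  rw [pvB_main block_size hpre]
  rw [pvA_main (message.toList.map (fun c => (c.toNat : Int))) block_size hpre
      ((message.toList.map (fun c => (c.toNat : Int))).length) 0 [] le_rfl ⟨0, by ring⟩ (by omega)]
  simp
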